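-- pv_equiv track=rewrite | github.com/qvasic/repo1 | codechef/mxpower/mxpower.py | iterate_diamond
-- ===== SOURCE A (Python) =====
-- def iterate_diamond( E, x, y, size ):
--     """
--     Iterate elements in E which lie in the diamond with center x,y and size size.
--     Order from top to bottom, from left to right - from lowest indexes to highest.
--     """
--     for i in range( size ):
--         row = y - size + 1 + i
--         for j in range( x-i, x+i+1 ):
--             yield E[row][j]
--
--     for i in range( 1, size ):
--         row = y + i
--         spread = size - i - 1
--         for j in range( x-spread, x+spread+1 ):
--             yield E[row][j]
-- ===== SOURCE B (Python) =====
-- def _plan(y, size):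
--     # Grow the diamond incrementally: the plan (list of (row, half-width) pairs)
--     # for size s is the plan for s-1 with every row widened by one, framed by a
--     # new width-0 top row and bottom row.
--     plan = []
--     for s in range(1, size + 1):
--         if s == 1:
--             plan = [(y, 0)]
--         else:
--             plan = [(y - s + 1, 0)] + [(r, w + 1) for (r, w) in plan] + [(y + s - 1, 0)]
--     return plan
--
--
-- def iterate_diamond(E, x, y, size):
--     for r, w in _plan(y, size):
--         for j in range(x - w, x + w + 1):
--             yield E[r][j]
-- ===== Notes on version B (the rewrite author's own statement) =====
-- stated objective: alternative
-- what changed: B builds the diamond incrementally: starting from a single centre cell, each step widens every existing row by one and frames it with new width-0 top and bottom rows, producing a row-plan list that is then traversed; A instead computes each row's bounds arithmetically in two stacked index loops.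
import Mathlib
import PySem

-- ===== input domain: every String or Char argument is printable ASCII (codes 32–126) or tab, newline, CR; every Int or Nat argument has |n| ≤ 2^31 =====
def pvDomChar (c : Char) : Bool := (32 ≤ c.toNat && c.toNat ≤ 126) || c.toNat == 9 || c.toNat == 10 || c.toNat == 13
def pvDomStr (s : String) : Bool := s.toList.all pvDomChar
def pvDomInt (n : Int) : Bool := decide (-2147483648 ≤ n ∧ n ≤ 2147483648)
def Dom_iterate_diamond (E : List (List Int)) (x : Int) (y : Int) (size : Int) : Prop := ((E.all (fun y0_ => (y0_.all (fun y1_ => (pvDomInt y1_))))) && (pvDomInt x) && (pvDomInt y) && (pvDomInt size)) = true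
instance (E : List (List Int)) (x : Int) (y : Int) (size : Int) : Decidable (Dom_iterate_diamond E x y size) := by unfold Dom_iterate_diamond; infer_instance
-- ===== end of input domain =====

-- B replaces A's two stacked index loops by incremental diamond growth: a row-plan list
-- rebuilt size times (widen every row, frame with width-0 top/bottom rows) and then
-- traversed (objective: alternative); same values in the same order.


-- ===== PORT A =====
-- Two stacked loops: top half incl. centre row, then bottom half; yields collected by append.
def iterate_diamond (E : List (List Int)) (x : Int) (y : Int) (size : Int) : List Int :=
  let acc1 := (PySem.List.pyRange 0 size 1).foldl (fun acc i =>
      let row := y - size + 1 + i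
      (PySem.List.pyRange (x - i) (x + i + 1) 1).foldl
        (fun acc j => acc ++ [PySem.List.pyGetD (PySem.List.pyGetD E row []) j 0]) acc) []
  (PySem.List.pyRange 1 size 1).foldl (fun acc i =>
      let row := y + i
      let spread := size - i - 1
      (PySem.List.pyRange (x - spread) (x + spread + 1) 1).foldl
        (fun acc j => acc ++ [PySem.List.pyGetD (PySem.List.pyGetD E row []) j 0]) acc) acc1

-- ===== PORT B =====
-- One step of the incremental growth: widen every planned row, frame with width-0 rows.
def pvPlanStep (y : Int) (plan : List (Int × Int)) (s : Int) : List (Int × Int) :=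
  if s = 1 then [(y, 0)]
  else (y - s + 1, 0) :: (plan.map (fun p => (p.1, p.2 + 1)) ++ [(y + s - 1, 0)])

-- _plan of Source B: grow the plan from the single centre cell, size times.
def pvPlan (y : Int) (size : Int) : List (Int × Int) :=
  (PySem.List.pyRange 1 (size + 1) 1).foldl (pvPlanStep y) []

-- Traversal of the plan (the two yield loops of Source B).
def iterate_diamond_alt (E : List (List Int)) (x : Int) (y : Int) (size : Int) : List Int :=
  (pvPlan y size).flatMap (fun p =>
    (PySem.List.pyRange (x - p.2) (x + p.2 + 1) 1).map
      (fun j => PySem.List.pyGetD (PySem.List.pyGetD E p.1 []) j 0))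

-- ===== PRECONDITION & SPEC =====
-- Pre_ excludes exactly the inputs where Python's E[row][j] raises IndexError:
-- every visited row index and column index must be in Python range of its list
-- (the row condition is the interval bound -len(E) <= y-(size-1), y+(size-1) < len(E)).
def Pre_iterate_diamond (E : List (List Int)) (x : Int) (y : Int) (size : Int) : Prop :=
  size ≤ 0 ∨
    ((-(E.length : Int) ≤ y - (size - 1) ∧ y + (size - 1) < (E.length : Int)) ∧
     ∀ d ∈ PySem.List.pyRange (-(size - 1)) size 1,
       ∀ j ∈ PySem.List.pyRange (x - (size - 1 - |d|)) (x + (size - 1 - |d|) + 1) 1,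
         PySem.Raise.InRange (PySem.List.pyGetD E (y + d) []).length j)
instance (E : List (List Int)) (x : Int) (y : Int) (size : Int) : Decidable (Pre_iterate_diamond E x y size) := by unfold Pre_iterate_diamond; infer_instance

def pvWitness_iterate_diamond : List (List Int) × Int × Int × Int :=
  ([[1, 2, 3], [4, 5, 6], [7, 8, 9]], 1, 1, 2)

def Spec_iterate_diamond (E : List (List Int)) (x : Int) (y : Int) (size : Int) (out : List Int) : Prop := out = iterate_diamond_alt E x y size
instance (E : List (List Int)) (x : Int) (y : Int) (size : Int) (out : List Int) : Decidable (Spec_iterate_diamond E x y size out) := by unfold Spec_iterate_diamond; infer_instance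

-- ===== CLAIM (what is proved, stated in full; the proofs are below) =====
def Claim_equal_iterate_diamond : Prop := ∀ (E : List (List Int)) (x : Int) (y : Int) (size : Int), Dom_iterate_diamond E x y size → Pre_iterate_diamond E x y size → Spec_iterate_diamond E x y size (iterate_diamond E x y size)

-- ===== LEMMAS AND PROOFS =====

-- A as a flat concatenation of its two loops' yields.
theorem iterate_diamond_eq_flatMap (E : List (List Int)) (x y size : Int) :
    iterate_diamond E x y size =
      (PySem.List.pyRange 0 size 1).flatMap (fun i =>
        (PySem.List.pyRange (x - i) (x + i + 1) 1).map
          (fun j => PySem.List.pyGetD (PySem.List.pyGetD E (y - size + 1 + i) []) j 0)) ++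
      (PySem.List.pyRange 1 size 1).flatMap (fun i =>
        (PySem.List.pyRange (x - (size - i - 1)) (x + (size - i - 1) + 1) 1).map
          (fun j => PySem.List.pyGetD (PySem.List.pyGetD E (y + i) []) j 0)) := by
  simp only [iterate_diamond, PySem.List.foldl_append_singleton_eq_map,
    PySem.List.foldl_append_eq_flatMap, List.nil_append]

-- A, reindexed into a single pass over the signed row offset d with half-width size-1-|d|.
theorem iterate_diamond_eq_dForm (E : List (List Int)) (x y size : Int) (hs : 0 < size) :
    iterate_diamond E x y size =
      (PySem.List.pyRange (1 - size) size 1).flatMap (fun d =>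
        (PySem.List.pyRange (x - (size - 1 - |d|)) (x + (size - 1 - |d|) + 1) 1).map
          (fun j => PySem.List.pyGetD (PySem.List.pyGetD E (y + d) []) j 0)) := by
  rw [iterate_diamond_eq_flatMap,
    PySem.List.pyRange_one_append (1 - size) 1 size (by omega) (by omega),
    List.flatMap_append]
  congr 1
  · -- top half: reindex d = i - (size - 1)
    rw [PySem.List.pyRange_one (1 - size) 1, PySem.List.pyRange_one 0 size,
      List.flatMap_map, List.flatMap_map,
      show (1 : Int) - (1 - size) = size - 0 from by ring]
    refine List.flatMap_congr ?_
    intro k hk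
    have hk' : (k : Int) < size := by simp only [List.mem_range] at hk; omega
    rw [show |(1 - size + (k : Int))| = size - 1 - k from by
          rw [abs_of_nonpos (by omega)]; ring,
        show y + (1 - size + (k : Int)) = y - size + 1 + (0 + (k : Int)) from by ring,
        show size - 1 - (size - 1 - (k : Int)) = 0 + (k : Int) from by ring]
  · -- bottom half: same index, |d| = d
    refine List.flatMap_congr ?_
    intro d hd
    rw [PySem.List.mem_pyRange_one] at hd
    rw [abs_of_nonneg (by omega), show size - 1 - d = size - d - 1 from by ring]

-- The grown plan of B is exactly the rows y+d with half-width size-1-|d|.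
theorem pvPlan_eq (y : Int) (n : Nat) (hn : 1 ≤ n) :
    pvPlan y n =
      (PySem.List.pyRange (1 - (n : Int)) n 1).map (fun d => (y + d, (n : Int) - 1 - |d|)) := by
  induction n with
  | zero => omega
  | succ m ih =>
    by_cases hm : m = 0
    · subst hm
      show pvPlan y 1 = _
      rw [pvPlan, show ((1 : Int) + 1) = 2 from by ring,
        show PySem.List.pyRange 1 2 1 = [1] from PySem.List.pyRange_one_singleton 1]
      simp [pvPlanStep, PySem.List.pyRange_one]
    · have hm1 : 1 ≤ m := by omega
      have hcast : ((m : Int) + 1 + 1) = (m : Int) + 2 := by ring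
      have hc : ((m + 1 : Nat) : Int) = (m : Int) + 1 := by push_cast; ring
      rw [pvPlan, hc,
        PySem.List.pyRange_one_succ_right (by omega : (1:Int) ≤ (m:Int)+1),
        List.foldl_append]
      have hfold : (PySem.List.pyRange 1 ((m : Int) + 1) 1).foldl (pvPlanStep y) [] = pvPlan y m := rfl
      rw [List.foldl, List.foldl, hfold, ih hm1, pvPlanStep,
        if_neg (by omega : ¬ ((m : Int) + 1 = 1))]
      -- RHS range: -m :: middle ++ [m]
      rw [show (1 : Int) - ((m : Int) + 1) = -(m : Int) from by ring,
        PySem.List.pyRange_one_cons (by omega : -(m : Int) < (m : Int) + 1),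
        show (-(m : Int) + 1) = 1 - (m : Int) from by ring,
        PySem.List.pyRange_one_succ_right (by omega : (1:Int) - (m:Int) ≤ (m:Int))]
      simp only [List.map_append, List.map_map, List.map]
      congr 1
      · rw [abs_of_nonpos (by omega : -(m : Int) ≤ 0)]
        simp only [Prod.mk.injEq]
        constructor <;> ring
      congr 1
      · refine List.map_congr_left ?_
        intro d hd
        rw [PySem.List.mem_pyRange_one] at hd
        simp only [Function.comp, Prod.mk.injEq]
        exact ⟨trivial, by ring⟩
      · simp only [List.cons.injEq, Prod.mk.injEq]
        refine ⟨⟨by ring, ?_⟩, trivial⟩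
        rw [abs_of_nonneg (by omega : (0 : Int) ≤ (m : Int))]
        ring

theorem iterate_diamond_spec : Claim_equal_iterate_diamond := by
  intro E x y size _ _
  unfold Spec_iterate_diamond iterate_diamond_alt
  by_cases hs : size ≤ 0
  · rw [pvPlan, PySem.List.pyRange_one_eq_nil (by omega)]
    rw [iterate_diamond_eq_flatMap,
      PySem.List.pyRange_one_eq_nil (by omega : size ≤ 0),
      PySem.List.pyRange_one_eq_nil (by omega : size ≤ 1)]
    simp
  · obtain ⟨n, hn⟩ : ∃ n : Nat, size = (n : Int) := ⟨size.toNat, by omega⟩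
    subst hn
    rw [pvPlan_eq y n (by omega), List.flatMap_map,
      iterate_diamond_eq_dForm E x y n (by omega)]
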